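-- pv_equiv track=rewrite | github.com/Shrekulka/educationalProjects | python/scraper/requests_and_beautiful_soup/lego_scraper/src/sync_scraper/extractors.py | get_toy_info
-- ===== SOURCE A (Python) =====
-- from typing import List, Dict, Tuple, Optional
--
-- def get_toy_info(toy_attributes: List[str]) -> Dict[str, Optional[str]]:
--     """
--     Извлекает информацию о возрасте, количестве деталей и рейтинге игрушек из списка атрибутов.
--
--     Args:
--         toy_attributes (List[str]): Список строк, представляющих атрибуты игрушки.
--
--     Returns:
--         Dict[str, Optional[str]]: Словарь, содержащий информацию об игрушке:
--             - 'age' (Optional[str]): Возрастная категория (если имеется).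
--             - 'pieces' (Optional[str]): Количество деталей (если имеется).
--             - 'rating' (Optional[str]): Рейтинг (если имеется).
--     """
--     # Инициализация словаря с атрибутами игрушки, изначально все значения равны None
--     toy_data = {
--         'age': None,
--         'pieces': None,
--         'rating': None
--     }
--
--     # Перебор всех атрибутов игрушки
--     for attr in toy_attributes:
--         # Проверка, содержит ли атрибут символ '+', что указывает на возраст
--         if '+' in attr:
--             toy_data['age'] = attr
--         # Проверка, содержит ли атрибут символ '.', что указывает на рейтинг
--         elif '.' in attr:
--             toy_data['rating'] = attr
--         # Если атрибут не содержит ни '+' ни '.', предполагаем, что это количество деталей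
--         else:
--             toy_data['pieces'] = attr
--
--     # Возвращаем словарь с извлеченной информацией об игрушке
--     return toy_data
-- ===== SOURCE B (Python) =====
-- def get_toy_info(toy_attributes):
--     age = next((a for a in reversed(toy_attributes) if '+' in a), None)
--     rating = next((a for a in reversed(toy_attributes) if '+' not in a and '.' in a), None)
--     pieces = next((a for a in reversed(toy_attributes) if '+' not in a and '.' not in a), None)
--     return {'age': age, 'pieces': pieces, 'rating': rating}
-- ===== Notes on version B (the rewrite author's own statement) =====
-- stated objective: alternative
-- what changed: Replaced the single classifying loop that overwrites dict entries with three independent reversed scans, each taking the last attribute matching its category predicate.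
import Mathlib
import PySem

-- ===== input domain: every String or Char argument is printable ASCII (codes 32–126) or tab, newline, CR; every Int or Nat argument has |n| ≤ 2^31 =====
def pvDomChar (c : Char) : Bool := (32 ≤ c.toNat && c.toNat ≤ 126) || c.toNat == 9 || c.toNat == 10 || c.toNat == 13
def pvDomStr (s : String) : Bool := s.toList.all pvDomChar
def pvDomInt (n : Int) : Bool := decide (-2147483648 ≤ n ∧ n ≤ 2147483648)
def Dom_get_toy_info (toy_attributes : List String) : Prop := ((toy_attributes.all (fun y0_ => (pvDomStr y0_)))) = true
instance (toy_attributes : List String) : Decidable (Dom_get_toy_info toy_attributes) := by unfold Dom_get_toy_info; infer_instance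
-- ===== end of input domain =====

-- B replaces A's single classifying loop (dict overwrites, last wins) by three independent
-- reversed scans, one per field; alternative decomposition, same cost.


-- ===== PORT A =====
def get_toy_info (toy_attributes : List String) : List (String × Option String) :=
  let toy_data : PySem.Dict String (Option String) :=
    PySem.Dict.ofList [("age", none), ("pieces", none), ("rating", none)]
  let toy_data :=
    toy_attributes.foldl (fun d attr =>
      if PySem.Str.isIn "+" attr then d.insert "age" (some attr)
      else if PySem.Str.isIn "." attr then d.insert "rating" (some attr)
      else d.insert "pieces" (some attr)) toy_data
  toy_data.items

-- ===== PORT B =====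
def get_toy_info_alt (toy_attributes : List String) : List (String × Option String) :=
  let age := toy_attributes.reverse.find? (fun a => PySem.Str.isIn "+" a)
  let rating := toy_attributes.reverse.find? (fun a => !PySem.Str.isIn "+" a && PySem.Str.isIn "." a)
  let pieces := toy_attributes.reverse.find? (fun a => !PySem.Str.isIn "+" a && !PySem.Str.isIn "." a)
  [("age", age), ("pieces", pieces), ("rating", rating)]

-- ===== PRECONDITION & SPEC =====
def Spec_get_toy_info (toy_attributes : List String) (out : List (String × Option String)) : Prop := out = get_toy_info_alt toy_attributes
instance (toy_attributes : List String) (out : List (String × Option String)) : Decidable (Spec_get_toy_info toy_attributes out) := by unfold Spec_get_toy_info; infer_instance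

-- ===== CLAIM (what is proved, stated in full; the proofs are below) =====
def Claim_equal_get_toy_info : Prop := ∀ (toy_attributes : List String), Dom_get_toy_info toy_attributes → Spec_get_toy_info toy_attributes (get_toy_info toy_attributes)

-- ===== LEMMAS AND PROOFS =====

-- "last element of xs matching q, defaulting to dflt"
def updLast (q : String → Bool) (xs : List String) (dflt : Option String) : Option String :=
  (xs.reverse.find? q).or dflt

theorem updLast_nil (q : String → Bool) (dflt : Option String) : updLast q [] dflt = dflt := rfl

theorem updLast_cons (q : String → Bool) (x : String) (xs : List String) (dflt : Option String) :
    updLast q (x :: xs) dflt = updLast q xs (if q x then some x else dflt) := by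
  simp [updLast, List.find?_append]
  cases h : xs.reverse.find? q <;> by_cases hx : q x <;> simp [hx, Option.or]

-- the loop of A, on the literal three-key dict, computes the three last-match fields
theorem foldl_toy (xs : List String) (a p r : Option String) :
    xs.foldl (fun d attr =>
      if PySem.Str.isIn "+" attr then d.insert "age" (some attr)
      else if PySem.Str.isIn "." attr then d.insert "rating" (some attr)
      else d.insert "pieces" (some attr))
      (PySem.Dict.mk [("age", a), ("pieces", p), ("rating", r)])
    = PySem.Dict.mk [("age", updLast (fun s => PySem.Str.isIn "+" s) xs a),
        ("pieces", updLast (fun s => !PySem.Str.isIn "+" s && !PySem.Str.isIn "." s) xs p),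
        ("rating", updLast (fun s => !PySem.Str.isIn "+" s && PySem.Str.isIn "." s) xs r)] := by
  induction xs generalizing a p r with
  | nil => simp [updLast_nil]
  | cons x xs ih =>
    simp only [List.foldl_cons, updLast_cons]
    by_cases h1 : PySem.Chars.isIn ['+'] x.toList
    · simpa [PySem.Str.isIn, h1, PySem.Dict.insert] using ih (some x) p r
    · by_cases h2 : PySem.Chars.isIn ['.'] x.toList
      · simpa [PySem.Str.isIn, h1, h2, PySem.Dict.insert] using ih a p (some x)
      · simpa [PySem.Str.isIn, h1, h2, PySem.Dict.insert] using ih a (some x) r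

theorem get_toy_info_eq_alt (xs : List String) : get_toy_info xs = get_toy_info_alt xs := by
  show (xs.foldl _ (PySem.Dict.ofList [("age", none), ("pieces", none), ("rating", none)])).items
      = get_toy_info_alt xs
  have : (PySem.Dict.ofList [("age", (none : Option String)), ("pieces", none), ("rating", none)])
      = PySem.Dict.mk [("age", none), ("pieces", none), ("rating", none)] := by decide
  rw [this, foldl_toy]
  simp [get_toy_info_alt, updLast]

-- ===== VERDICT (by name: the statement is the Claim_ definition above) =====
theorem get_toy_info_spec : Claim_equal_get_toy_info := by
  intro xs _
  exact get_toy_info_eq_alt xs
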